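-- pv_equiv track=rewrite | github.com/SoniaComp/Algorithm_Python_2021 | python/week19/BOJ17070_optimized.py | solution
-- ===== SOURCE A (Python) =====
-- def solution(N, room):
--     dp = [[[0]*3 for _ in range(16)]for _ in range(16)]
--     dp[0][1][0] = 1
--     for j in range(2, N):
--         if not room[0][j]:
--             if not room[0][j]:
--                 dp[0][j][0] = dp[0][j-1][0]
--     for i in range(1, N):
--         for j in range(2, N):
--             if not room[i][j] and not room[i][j-1] and not room[i-1][j]:
--                 dp[i][j][1] = dp[i-1][j-1][0] + dp[i-1][j-1][1] + dp[i-1][j-1][2]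
--             if not room[i][j]:
--                 dp[i][j][0] = dp[i][j-1][0]+dp[i][j-1][1]
--                 dp[i][j][2] = dp[i-1][j][1]+dp[i-1][j][2]
--     return sum(dp[N-1][N-1])
-- ===== SOURCE B (Python) =====
-- def solution(N, room):
--     # Top-down memoized recursion over the same recurrence as the bottom-up table.
--     memo = {}
--
--     def f(i, j, d):
--         if i < 0 or j < 0:
--             return 0
--         key = (i, j, d)
--         if key in memo:
--             return memo[key]
--         if i == 0:
--             if d == 0:
--                 if j == 1:
--                     v = 1
--                 elif j >= 2 and not room[0][j]:
--                     v = f(0, j - 1, 0)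
--                 else:
--                     v = 0
--             else:
--                 v = 0
--         elif j < 2:
--             v = 0
--         elif d == 1:
--             if not room[i][j] and not room[i][j - 1] and not room[i - 1][j]:
--                 v = f(i - 1, j - 1, 0) + f(i - 1, j - 1, 1) + f(i - 1, j - 1, 2)
--             else:
--                 v = 0
--         elif d == 0:
--             if not room[i][j]:
--                 v = f(i, j - 1, 0) + f(i, j - 1, 1)
--             else:
--                 v = 0
--         else:
--             if not room[i][j]:
--                 v = f(i - 1, j, 1) + f(i - 1, j, 2)
--             else:
--                 v = 0
--         memo[key] = v
--         return v
--
--     return f(N - 1, N - 1, 0) + f(N - 1, N - 1, 1) + f(N - 1, N - 1, 2)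
-- ===== Notes on version B (the rewrite author's own statement) =====
-- stated objective: alternative
-- what changed: The bottom-up 16x16x3 table with two fill loops is replaced by a top-down memoized recursion f(i,j,d) over the same recurrence, computed only for the states reachable from (N-1,N-1).
import Mathlib
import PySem

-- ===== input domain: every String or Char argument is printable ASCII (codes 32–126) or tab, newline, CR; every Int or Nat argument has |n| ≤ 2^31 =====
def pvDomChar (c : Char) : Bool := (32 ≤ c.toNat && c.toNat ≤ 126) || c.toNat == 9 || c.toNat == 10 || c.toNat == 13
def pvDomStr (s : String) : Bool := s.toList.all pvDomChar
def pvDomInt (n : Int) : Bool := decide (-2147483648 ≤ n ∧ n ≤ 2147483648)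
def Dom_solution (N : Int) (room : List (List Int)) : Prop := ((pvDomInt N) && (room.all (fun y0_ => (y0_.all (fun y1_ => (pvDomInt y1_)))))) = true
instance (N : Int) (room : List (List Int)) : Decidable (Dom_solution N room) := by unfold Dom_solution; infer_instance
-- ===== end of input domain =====

-- B replaces A's bottom-up 16x16x3 table fill by a top-down memoized recursion over the
-- same recurrence (objective: alternative decomposition; not claimed faster).

-- room[i][j] (total form; inside Pre_ every access either is in range or is never reached)
def pvRoom (room : List (List Int)) (i j : Int) : Int :=
  PySem.List.pyGetD (PySem.List.pyGetD room i []) j 0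

-- ===== PORT A =====
-- A's dp array is modelled as a total function Int→Int→Int→Int (a cell update is a
-- pointwise overwrite); every write/read of the Python table is transcribed one for one.
def pvUpd (dp : Int → Int → Int → Int) (a b c : Int) (v : Int) : Int → Int → Int → Int :=
  fun x y z => if x = a ∧ y = b ∧ z = c then v else dp x y z

-- Python's dp[N-1] wraps a negative index into the 16-entry table
def pvWrap (k : Int) : Int := if k < 0 then k + 16 else k

-- body of A's first loop (over j)
def pvBody1 (room : List (List Int)) (dp : Int → Int → Int → Int) (j : Int) :
    Int → Int → Int → Int :=
  if pvRoom room 0 j = 0 then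
    if pvRoom room 0 j = 0 then pvUpd dp 0 j 0 (dp 0 (j-1) 0) else dp
  else dp

-- body of A's inner loop (over j, at row i)
def pvInner (room : List (List Int)) (i : Int) (dp : Int → Int → Int → Int) (j : Int) :
    Int → Int → Int → Int :=
  let dpA := if pvRoom room i j = 0 ∧ pvRoom room i (j-1) = 0 ∧ pvRoom room (i-1) j = 0
    then pvUpd dp i j 1 (dp (i-1) (j-1) 0 + dp (i-1) (j-1) 1 + dp (i-1) (j-1) 2)
    else dp
  if pvRoom room i j = 0 then
    let dpB := pvUpd dpA i j 0 (dpA i (j-1) 0 + dpA i (j-1) 1)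
    pvUpd dpB i j 2 (dpB (i-1) j 1 + dpB (i-1) j 2)
  else dpA

-- body of A's outer loop (over i)
def pvOuter (room : List (List Int)) (N : Int) (dp : Int → Int → Int → Int) (i : Int) :
    Int → Int → Int → Int :=
  (PySem.List.pyRange 2 N 1).foldl (pvInner room i) dp

def solution (N : Int) (room : List (List Int)) : Int :=
  let dp1 := pvUpd (fun _ _ _ => 0) 0 1 0 1
  let dp2 := (PySem.List.pyRange 2 N 1).foldl (pvBody1 room) dp1
  let dp3 := (PySem.List.pyRange 1 N 1).foldl (pvOuter room N) dp2
  dp3 (pvWrap (N-1)) (pvWrap (N-1)) 0 + dp3 (pvWrap (N-1)) (pvWrap (N-1)) 1 +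
    dp3 (pvWrap (N-1)) (pvWrap (N-1)) 2

-- ===== PORT B =====
-- f(i,j,d) with the memo dict threaded through, exactly as in Source B; the Nat fuel only
-- makes the recursion structural (every recursive call decreases i+j, so the fuel chosen
-- at the call site is never exhausted)
def pvF (room : List (List Int)) : Nat → Int → Int → Int →
    PySem.Dict (Int × Int × Int) Int → Int × PySem.Dict (Int × Int × Int) Int
  | 0, _, _, _, memo => (0, memo)
  | fuel+1, i, j, d, memo =>
    if i < 0 ∨ j < 0 then (0, memo)
    else
      match memo.get? (i, j, d) with
      | some v => (v, memo)
      | none =>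
        let r :=
          if i = 0 then
            if d = 0 then
              if j = 1 then (1, memo)
              else if 2 ≤ j ∧ pvRoom room 0 j = 0 then pvF room fuel 0 (j-1) 0 memo
              else (0, memo)
            else (0, memo)
          else if j < 2 then (0, memo)
          else if d = 1 then
            if pvRoom room i j = 0 ∧ pvRoom room i (j-1) = 0 ∧ pvRoom room (i-1) j = 0 then
              let p0 := pvF room fuel (i-1) (j-1) 0 memo
              let p1 := pvF room fuel (i-1) (j-1) 1 p0.2
              let p2 := pvF room fuel (i-1) (j-1) 2 p1.2
              (p0.1 + p1.1 + p2.1, p2.2)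
            else (0, memo)
          else if d = 0 then
            if pvRoom room i j = 0 then
              let p0 := pvF room fuel i (j-1) 0 memo
              let p1 := pvF room fuel i (j-1) 1 p0.2
              (p0.1 + p1.1, p1.2)
            else (0, memo)
          else
            if pvRoom room i j = 0 then
              let p1 := pvF room fuel (i-1) j 1 memo
              let p2 := pvF room fuel (i-1) j 2 p1.2
              (p1.1 + p2.1, p2.2)
            else (0, memo)
        (r.1, r.2.insert (i, j, d) r.1)

def solution_alt (N : Int) (room : List (List Int)) : Int :=
  let fl := ((N-1) + (N-1)).toNat + 1
  let q0 := pvF room fl (N-1) (N-1) 0 PySem.Dict.empty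
  let q1 := pvF room fl (N-1) (N-1) 1 q0.2
  let q2 := pvF room fl (N-1) (N-1) 2 q1.2
  q0.1 + q1.1 + q2.1

-- ===== PRECONDITION & SPEC =====
-- Pre_ = exactly the inputs on which the Python A returns (otherwise it raises IndexError:
-- dp is a fixed 16x16 table so writes need N ≤ 16 and the final read dp[N-1] wraps only
-- down to index -16, i.e. N ≥ -15; and for N ≥ 3 each of the first N rows of room is read
-- unconditionally at columns up to N-1).
def Pre_solution (N : Int) (room : List (List Int)) : Prop :=
  -15 ≤ N ∧ N ≤ 16 ∧
    (3 ≤ N → N ≤ (room.length : Int) ∧ ∀ row ∈ room.take N.toNat, N ≤ (row.length : Int))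
instance (N : Int) (room : List (List Int)) : Decidable (Pre_solution N room) := by
  unfold Pre_solution; infer_instance

def pvWitness_solution : Int × List (List Int) :=
  (3, [[0, 0, 0], [0, 0, 0], [0, 1, 0]])

def Spec_solution (N : Int) (room : List (List Int)) (out : Int) : Prop := out = solution_alt N room
instance (N : Int) (room : List (List Int)) (out : Int) : Decidable (Spec_solution N room out) := by unfold Spec_solution; infer_instance

-- ===== CLAIM (what is proved, stated in full; the proofs are below) =====
def Claim_equal_solution : Prop := ∀ (N : Int) (room : List (List Int)), Dom_solution N room → Pre_solution N room → Spec_solution N room (solution N room)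

-- ===== LEMMAS AND PROOFS =====

-- the pure recurrence both programs compute
def pvG (room : List (List Int)) (i j d : Int) : Int :=
  if i < 0 ∨ j < 0 then 0
  else if i = 0 then
    if d = 0 then
      if j = 1 then 1
      else if 2 ≤ j ∧ pvRoom room 0 j = 0 then pvG room 0 (j-1) 0
      else 0
    else 0
  else if j < 2 then 0
  else if d = 1 then
    if pvRoom room i j = 0 ∧ pvRoom room i (j-1) = 0 ∧ pvRoom room (i-1) j = 0 then
      pvG room (i-1) (j-1) 0 + pvG room (i-1) (j-1) 1 + pvG room (i-1) (j-1) 2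
    else 0
  else if d = 0 then
    if pvRoom room i j = 0 then pvG room i (j-1) 0 + pvG room i (j-1) 1 else 0
  else
    if pvRoom room i j = 0 then pvG room (i-1) j 1 + pvG room (i-1) j 2 else 0
termination_by (i + j).toNat
decreasing_by all_goals omega

-- unfolding lemmas for pvG
theorem pvG_neg (room : List (List Int)) (i j d : Int) (h : i < 0 ∨ j < 0) :
    pvG room i j d = 0 := by rw [pvG]; simp [h]

theorem pvG_011 (room : List (List Int)) : pvG room 0 1 0 = 1 := by rw [pvG]; norm_num

theorem pvG_000 (room : List (List Int)) (c : Int) : pvG room 0 0 c = 0 := by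
  rw [pvG]; norm_num

theorem pvG_row0_d (room : List (List Int)) (j d : Int) (hj : 0 ≤ j) (hd : d ≠ 0) :
    pvG room 0 j d = 0 := by
  rw [pvG]
  simp only [if_neg (show ¬((0:Int) < 0 ∨ j < 0) by omega)]
  norm_num [hd]

theorem pvG_row0_rec (room : List (List Int)) (j : Int) (hj : 2 ≤ j) :
    pvG room 0 j 0 = if pvRoom room 0 j = 0 then pvG room 0 (j-1) 0 else 0 := by
  rw [pvG]
  simp only [if_neg (show ¬((0:Int) < 0 ∨ j < 0) by omega),
    if_neg (show j ≠ 1 by omega)]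
  norm_num
  split_ifs with h1 h2 h2 <;> first | rfl | omega

theorem pvG_j01 (room : List (List Int)) (i j d : Int) (hi : 1 ≤ i) (hj0 : 0 ≤ j)
    (hj : j < 2) : pvG room i j d = 0 := by
  rw [pvG]
  simp only [if_neg (show ¬(i < 0 ∨ j < 0) by omega), if_neg (show i ≠ 0 by omega),
    if_pos hj]

theorem pvG_rec1 (room : List (List Int)) (i j : Int) (hi : 1 ≤ i) (hj : 2 ≤ j) :
    pvG room i j 1 =
      if pvRoom room i j = 0 ∧ pvRoom room i (j-1) = 0 ∧ pvRoom room (i-1) j = 0 then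
        pvG room (i-1) (j-1) 0 + pvG room (i-1) (j-1) 1 + pvG room (i-1) (j-1) 2
      else 0 := by
  rw [pvG]
  simp only [if_neg (show ¬(i < 0 ∨ j < 0) by omega), if_neg (show i ≠ 0 by omega),
    if_neg (show ¬ j < 2 by omega)]
  norm_num

theorem pvG_rec0 (room : List (List Int)) (i j : Int) (hi : 1 ≤ i) (hj : 2 ≤ j) :
    pvG room i j 0 =
      if pvRoom room i j = 0 then pvG room i (j-1) 0 + pvG room i (j-1) 1 else 0 := by
  rw [pvG]
  simp only [if_neg (show ¬(i < 0 ∨ j < 0) by omega), if_neg (show i ≠ 0 by omega),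
    if_neg (show ¬ j < 2 by omega)]
  norm_num

theorem pvG_rec2 (room : List (List Int)) (i j : Int) (hi : 1 ≤ i) (hj : 2 ≤ j) :
    pvG room i j 2 =
      if pvRoom room i j = 0 then pvG room (i-1) j 1 + pvG room (i-1) j 2 else 0 := by
  rw [pvG]
  simp only [if_neg (show ¬(i < 0 ∨ j < 0) by omega), if_neg (show i ≠ 0 by omega),
    if_neg (show ¬ j < 2 by omega)]
  norm_num

-- ===== B side: the memoized recursion computes pvG =====
def pvCoh (room : List (List Int)) (memo : PySem.Dict (Int × Int × Int) Int) : Prop :=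
  ∀ i j d v, memo.get? (i, j, d) = some v → v = pvG room i j d

theorem pvF_eq_g (room : List (List Int)) : ∀ (fuel : Nat) (i j d : Int)
    (memo : PySem.Dict (Int × Int × Int) Int), i + j < (fuel:Int) → pvCoh room memo →
    (pvF room fuel i j d memo).1 = pvG room i j d ∧ pvCoh room (pvF room fuel i j d memo).2 := by
  intro fuel
  induction fuel with
  | zero =>
    intro i j d memo hf hcoh
    exact ⟨(pvG_neg room i j d (by omega)).symm, hcoh⟩
  | succ fuel ih =>
    intro i j d memo hf hcoh
    by_cases h1 : i < 0 ∨ j < 0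
    · simp only [pvF, if_pos h1]
      exact ⟨(pvG_neg room i j d h1).symm, hcoh⟩
    · cases hmem : memo.get? (i, j, d) with
      | some v =>
        simp only [pvF, if_neg h1, hmem]
        exact ⟨hcoh i j d v hmem, hcoh⟩
      | none =>
        simp only [pvF, if_neg h1, hmem]
        have key : ∀ r : Int × PySem.Dict (Int × Int × Int) Int,
            r.1 = pvG room i j d ∧ pvCoh room r.2 →
            ((r.1, r.2.insert (i, j, d) r.1).1 = pvG room i j d ∧
              pvCoh room (r.1, r.2.insert (i, j, d) r.1).2) := by
          rintro ⟨rv, rm⟩ ⟨hval, hc⟩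
          refine ⟨hval, ?_⟩
          intro i' j' d' v hv
          rw [PySem.Dict.get?_insert] at hv
          by_cases he : (i', j', d') = (i, j, d)
          · rw [if_pos he] at hv
            cases hv
            simp only [Prod.mk.injEq] at he
            obtain ⟨rfl, rfl, rfl⟩ := he
            exact hval
          · rw [if_neg he] at hv
            exact hc i' j' d' v hv
        apply key
        rw [pvG]
        simp only [if_neg h1]
        split_ifs with hi hd0 hj1 hcnd hj2 hd1 htrip hfree0 hfree2
        case _ => exact ⟨rfl, hcoh⟩
        case _ =>
          subst hi
          exact ih 0 (j-1) 0 memo (by omega) hcoh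
        case _ => exact ⟨rfl, hcoh⟩
        case _ => exact ⟨rfl, hcoh⟩
        case _ => exact ⟨rfl, hcoh⟩
        case _ =>
          obtain ⟨e0, c0⟩ := ih (i-1) (j-1) 0 memo (by omega) hcoh
          obtain ⟨e1, c1⟩ := ih (i-1) (j-1) 1 _ (by omega) c0
          obtain ⟨e2, c2⟩ := ih (i-1) (j-1) 2 _ (by omega) c1
          exact ⟨by rw [← e0, ← e1, ← e2], c2⟩
        case _ => exact ⟨rfl, hcoh⟩
        case _ =>
          obtain ⟨e0, c0⟩ := ih i (j-1) 0 memo (by omega) hcoh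
          obtain ⟨e1, c1⟩ := ih i (j-1) 1 _ (by omega) c0
          exact ⟨by rw [← e0, ← e1], c1⟩
        case _ => exact ⟨rfl, hcoh⟩
        case _ =>
          obtain ⟨e1, c1⟩ := ih (i-1) j 1 memo (by omega) hcoh
          obtain ⟨e2, c2⟩ := ih (i-1) j 2 _ (by omega) c1
          exact ⟨by rw [← e1, ← e2], c2⟩
        case _ => exact ⟨rfl, hcoh⟩

theorem pvAlt_eq_g (N : Int) (room : List (List Int)) :
    solution_alt N room =
      pvG room (N-1) (N-1) 0 + pvG room (N-1) (N-1) 1 + pvG room (N-1) (N-1) 2 := by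
  have hempty : pvCoh room PySem.Dict.empty := by
    intro i j d v hv
    rw [PySem.Dict.get?_empty] at hv
    cases hv
  have hf : (N-1) + (N-1) < ((((N-1) + (N-1)).toNat + 1 : Nat) : Int) := by omega
  obtain ⟨e0, c0⟩ := pvF_eq_g room (((N-1) + (N-1)).toNat + 1) (N-1) (N-1) 0
    PySem.Dict.empty hf hempty
  obtain ⟨e1, c1⟩ := pvF_eq_g room (((N-1) + (N-1)).toNat + 1) (N-1) (N-1) 1 _ hf c0
  obtain ⟨e2, _⟩ := pvF_eq_g room (((N-1) + (N-1)).toNat + 1) (N-1) (N-1) 2 _ hf c1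
  show (pvF room (((N-1) + (N-1)).toNat + 1) (N-1) (N-1) 0 PySem.Dict.empty).1
      + (pvF room (((N-1) + (N-1)).toNat + 1) (N-1) (N-1) 1
          (pvF room (((N-1) + (N-1)).toNat + 1) (N-1) (N-1) 0 PySem.Dict.empty).2).1
      + (pvF room (((N-1) + (N-1)).toNat + 1) (N-1) (N-1) 2
          (pvF room (((N-1) + (N-1)).toNat + 1) (N-1) (N-1) 1
            (pvF room (((N-1) + (N-1)).toNat + 1) (N-1) (N-1) 0 PySem.Dict.empty).2).2).1 = _
  rw [e0, e1, e2]

-- ===== A side: the table fill computes pvG =====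
-- table state after the row-0 loop has processed columns < m
def pvRow0 (room : List (List Int)) (m : Int) : Int → Int → Int → Int :=
  fun a b c =>
    if a = 0 ∧ c = 0 ∧ (b = 1 ∨ (2 ≤ b ∧ b < m)) then pvG room 0 b 0 else 0

-- table state when rows < i0 are fully processed and row i0 is processed for columns < j0
def pvTab (room : List (List Int)) (N i0 j0 : Int) : Int → Int → Int → Int :=
  fun a b c =>
    if a = 0 ∧ c = 0 ∧ (b = 1 ∨ (2 ≤ b ∧ b < N)) then pvG room 0 b 0
    else if 1 ≤ a ∧ a < i0 ∧ 2 ≤ b ∧ b < N ∧ (c = 0 ∨ c = 1 ∨ c = 2) then pvG room a b c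
    else if a = i0 ∧ 1 ≤ i0 ∧ 2 ≤ b ∧ b < j0 ∧ (c = 0 ∨ c = 1 ∨ c = 2) then pvG room a b c
    else 0

theorem pvBody1_step (room : List (List Int)) (m : Int) (hm : 2 ≤ m) :
    pvBody1 room (pvRow0 room m) m = pvRow0 room (m+1) := by
  unfold pvBody1
  have hread : pvRow0 room m 0 (m-1) 0 = pvG room 0 (m-1) 0 := by
    simp only [pvRow0]
    split_ifs with h
    · rfl
    · exact absurd (by refine ⟨?_, ?_, by omega⟩ <;> trivial) h
  by_cases hfree : pvRoom room 0 m = 0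
  · rw [if_pos hfree, if_pos hfree, hread]
    funext a b c
    simp only [pvUpd, pvRow0]
    by_cases hcell : a = 0 ∧ b = m ∧ c = 0
    · rw [if_pos hcell]
      obtain ⟨rfl, hb, rfl⟩ := hcell
      rw [hb, pvG_row0_rec room m hm, if_pos hfree]
      split_ifs with h
      · rfl
      · exact absurd (by refine ⟨?_, ?_, by omega⟩ <;> trivial) h
    · rw [if_neg hcell]
      split_ifs with h1 h2 h2 <;> first | rfl | omega
  · rw [if_neg hfree]
    funext a b c
    simp only [pvRow0]
    split_ifs with h1 h2 h2
    · rfl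
    · omega
    · have hb : b = m := by omega
      rw [hb, pvG_row0_rec room m hm, if_neg hfree]
    · rfl

theorem pvStage1_aux (room : List (List Int)) (k : Nat) :
    (PySem.List.pyRange 2 (2 + (k:Int)) 1).foldl (pvBody1 room) (pvUpd (fun _ _ _ => 0) 0 1 0 1)
      = pvRow0 room (2 + (k:Int)) := by
  induction k with
  | zero =>
    rw [show ((2:Int) + ((0:Nat):Int)) = 2 by norm_num, PySem.List.pyRange_one_eq_nil le_rfl]
    funext a b c
    simp only [List.foldl_nil, pvUpd, pvRow0]
    split_ifs with h1 h2 h2 <;> first | omega | rfl |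
      (obtain ⟨rfl, rfl, rfl⟩ := h1; rw [pvG_011])
  | succ k ih =>
    have h1 : (2:Int) + ((k+1:Nat):Int) = (2 + (k:Int)) + 1 := by push_cast; ring
    rw [h1, PySem.List.pyRange_one_succ_right (by omega), List.foldl_append, ih]
    simp only [List.foldl_cons, List.foldl_nil]
    exact pvBody1_step room (2 + (k:Int)) (by omega)

theorem pvTab_read (room : List (List Int)) (N i0 m a b c : Int) (hi0 : 1 ≤ i0)
    (hcs : c = 0 ∨ c = 1 ∨ c = 2)
    (hcase : (0 ≤ a ∧ a < i0 ∧ 0 ≤ b ∧ b < N) ∨ (a = i0 ∧ 0 ≤ b ∧ b < m)) :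
    pvTab room N i0 m a b c = pvG room a b c := by
  simp only [pvTab]
  split_ifs with h1 h2 h3
  · obtain ⟨ha, hc, -⟩ := h1
    rw [ha, hc]
  · rfl
  · rfl
  · by_cases ha : a = 0
    · subst ha
      by_cases hc : c = 0
      · subst hc
        have hb : b = 0 := by omega
        rw [hb]
        exact (pvG_000 room 0).symm
      · exact (pvG_row0_d room b c (by omega) hc).symm
    · have ha1 : 1 ≤ a := by omega
      have hb2 : b < 2 := by omega
      exact (pvG_j01 room a b c ha1 (by omega) hb2).symm

theorem pvTab_widen (room : List (List Int)) (N i0 m x y z : Int) (hm2 : 2 ≤ m)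
    (hnc : ¬(x = i0 ∧ y = m ∧ (z = 0 ∨ z = 1 ∨ z = 2))) :
    pvTab room N i0 m x y z = pvTab room N i0 (m+1) x y z := by
  simp only [pvTab]
  split_ifs <;> first | rfl | omega

theorem pvTab_widen_blocked (room : List (List Int)) (N i0 m x y z : Int) (hi0 : 1 ≤ i0)
    (hm2 : 2 ≤ m) (hfree : ¬ pvRoom room i0 m = 0) (hnc : ¬(x = i0 ∧ y = m ∧ z = 1)) :
    pvTab room N i0 m x y z = pvTab room N i0 (m+1) x y z := by
  by_cases g : x = i0 ∧ y = m ∧ (z = 0 ∨ z = 1 ∨ z = 2)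
  · obtain ⟨hx, hy, hz⟩ := g
    simp only [pvTab]
    rw [if_neg (show ¬(x = 0 ∧ z = 0 ∧ (y = 1 ∨ (2 ≤ y ∧ y < N))) by omega),
      if_neg (show ¬(1 ≤ x ∧ x < i0 ∧ 2 ≤ y ∧ y < N ∧ (z = 0 ∨ z = 1 ∨ z = 2)) by omega),
      if_neg (show ¬(x = i0 ∧ 1 ≤ i0 ∧ 2 ≤ y ∧ y < m ∧ (z = 0 ∨ z = 1 ∨ z = 2)) by omega),
      if_neg (show ¬(x = 0 ∧ z = 0 ∧ (y = 1 ∨ (2 ≤ y ∧ y < N))) by omega),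
      if_neg (show ¬(1 ≤ x ∧ x < i0 ∧ 2 ≤ y ∧ y < N ∧ (z = 0 ∨ z = 1 ∨ z = 2)) by omega),
      if_pos (show x = i0 ∧ 1 ≤ i0 ∧ 2 ≤ y ∧ y < m + 1 ∧ (z = 0 ∨ z = 1 ∨ z = 2) from
        ⟨hx, hi0, by omega, by omega, hz⟩)]
    rcases hz with hz | hz | hz
    · rw [hx, hy, hz, pvG_rec0 room i0 m hi0 hm2, if_neg hfree]
    · exact absurd ⟨hx, hy, hz⟩ hnc
    · rw [hx, hy, hz, pvG_rec2 room i0 m hi0 hm2, if_neg hfree]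
  · simp only [pvTab]
    split_ifs <;> first | rfl | omega

theorem pvInner_step (room : List (List Int)) (N i0 m : Int) (hi0 : 1 ≤ i0)
    (hm2 : 2 ≤ m) (hmN : m < N) :
    pvInner room i0 (pvTab room N i0 m) m = pvTab room N i0 (m+1) := by
  unfold pvInner
  set T := pvTab room N i0 m with hT
  have rd : ∀ a b c, (c = 0 ∨ c = 1 ∨ c = 2) →
      ((0 ≤ a ∧ a < i0 ∧ 0 ≤ b ∧ b < N) ∨ (a = i0 ∧ 0 ≤ b ∧ b < m)) →
      T a b c = pvG room a b c := fun a b c hcs hcase =>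
    pvTab_read room N i0 m a b c hi0 hcs hcase
  have hT1 : T i0 m 1 = 0 := by
    simp only [hT, pvTab]
    split_ifs <;> first | rfl | omega
  have hdpA : (if pvRoom room i0 m = 0 ∧ pvRoom room i0 (m-1) = 0 ∧ pvRoom room (i0-1) m = 0
      then pvUpd T i0 m 1 (T (i0-1) (m-1) 0 + T (i0-1) (m-1) 1 + T (i0-1) (m-1) 2)
      else T)
      = fun x y z => if x = i0 ∧ y = m ∧ z = 1 then pvG room i0 m 1 else T x y z := by
    by_cases htrip : pvRoom room i0 m = 0 ∧ pvRoom room i0 (m-1) = 0 ∧ pvRoom room (i0-1) m = 0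
    · rw [if_pos htrip]
      funext x y z
      simp only [pvUpd]
      split_ifs with hcell
      · rw [rd (i0-1) (m-1) 0 (by omega) (by omega), rd (i0-1) (m-1) 1 (by omega) (by omega),
          rd (i0-1) (m-1) 2 (by omega) (by omega), pvG_rec1 room i0 m hi0 hm2, if_pos htrip]
      · rfl
    · rw [if_neg htrip]
      funext x y z
      split_ifs with hcell
      · obtain ⟨h1', h2', h3'⟩ := hcell
        rw [h1', h2', h3', hT1, pvG_rec1 room i0 m hi0 hm2, if_neg htrip]
      · rfl
  rw [hdpA]
  set dpA : Int → Int → Int → Int :=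
    fun x y z => if x = i0 ∧ y = m ∧ z = 1 then pvG room i0 m 1 else T x y z with hA
  have hdA : ∀ x y z, ¬(x = i0 ∧ y = m ∧ z = 1) → dpA x y z = T x y z := by
    intro x y z h
    simp only [hA]
    rw [if_neg h]
  have hd1 : dpA i0 m 1 = pvG room i0 m 1 := by
    simp only [hA]
    norm_num
  by_cases hfree : pvRoom room i0 m = 0
  · rw [if_pos hfree]
    have hX : dpA i0 (m-1) 0 + dpA i0 (m-1) 1 = pvG room i0 m 0 := by
      rw [hdA i0 (m-1) 0 (by omega), hdA i0 (m-1) 1 (by omega),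
        rd i0 (m-1) 0 (by omega) (by omega), rd i0 (m-1) 1 (by omega) (by omega),
        pvG_rec0 room i0 m hi0 hm2, if_pos hfree]
    set dpB : Int → Int → Int → Int := pvUpd dpA i0 m 0 (dpA i0 (m-1) 0 + dpA i0 (m-1) 1)
      with hB
    have hBr : ∀ x y z, ¬(x = i0 ∧ y = m ∧ z = 0) → dpB x y z = dpA x y z := by
      intro x y z h
      simp only [hB, pvUpd]
      rw [if_neg h]
    have hY : dpB (i0-1) m 1 + dpB (i0-1) m 2 = pvG room i0 m 2 := by
      rw [hBr (i0-1) m 1 (by omega), hBr (i0-1) m 2 (by omega),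
        hdA (i0-1) m 1 (by omega), hdA (i0-1) m 2 (by omega),
        rd (i0-1) m 1 (by omega) (by omega), rd (i0-1) m 2 (by omega) (by omega),
        pvG_rec2 room i0 m hi0 hm2, if_pos hfree]
    funext x y z
    simp only [pvUpd, hY]
    split_ifs with hc2
    · rw [hc2.1, hc2.2.1, hc2.2.2,
        pvTab_read room N i0 (m+1) i0 m 2 hi0 (by omega) (Or.inr ⟨rfl, by omega, by omega⟩)]
    · rw [hB]
      simp only [pvUpd]
      split_ifs with hc0
      · rw [hX, hc0.1, hc0.2.1, hc0.2.2,
          pvTab_read room N i0 (m+1) i0 m 0 hi0 (by omega) (Or.inr ⟨rfl, by omega, by omega⟩)]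
      · simp only [hA]
        split_ifs with hc1
        · rw [hc1.1, hc1.2.1, hc1.2.2,
            pvTab_read room N i0 (m+1) i0 m 1 hi0 (by omega) (Or.inr ⟨rfl, by omega, by omega⟩)]
        · rw [hT]
          exact pvTab_widen room N i0 m x y z hm2 (by omega)
  · rw [if_neg hfree]
    funext x y z
    simp only [hA]
    split_ifs with hc1
    · rw [hc1.1, hc1.2.1, hc1.2.2,
        pvTab_read room N i0 (m+1) i0 m 1 hi0 (by omega) (Or.inr ⟨rfl, by omega, by omega⟩)]
    · rw [hT]
      exact pvTab_widen_blocked room N i0 m x y z hi0 hm2 hfree hc1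

theorem pvInner_aux (room : List (List Int)) (N i0 : Int) (hi0 : 1 ≤ i0)
    (k : Nat) (hk : 2 + (k:Int) ≤ N) :
    (PySem.List.pyRange 2 (2 + (k:Int)) 1).foldl (pvInner room i0) (pvTab room N i0 2)
      = pvTab room N i0 (2 + (k:Int)) := by
  induction k with
  | zero =>
    rw [show ((2:Int) + ((0:Nat):Int)) = 2 by norm_num, PySem.List.pyRange_one_eq_nil le_rfl]
    rfl
  | succ k ih =>
    have h1 : (2:Int) + ((k+1:Nat):Int) = (2 + (k:Int)) + 1 := by push_cast; ring
    rw [h1, PySem.List.pyRange_one_succ_right (by omega), List.foldl_append,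
      ih (by omega)]
    simp only [List.foldl_cons, List.foldl_nil]
    exact pvInner_step room N i0 (2 + (k:Int)) hi0 (by omega) (by omega)

theorem pvOuter_step (room : List (List Int)) (N i0 : Int) (hi0 : 1 ≤ i0) (hiN : i0 < N) :
    pvOuter room N (pvTab room N i0 2) i0 = pvTab room N (i0+1) 2 := by
  unfold pvOuter
  by_cases hN3 : 3 ≤ N
  · have h := pvInner_aux room N i0 hi0 (N-2).toNat (by omega)
    rw [show ((2:Int) + ((N-2).toNat:Int)) = N by omega] at h
    rw [h]
    funext x y z
    simp only [pvTab]
    split_ifs <;> first | rfl | omega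
  · rw [PySem.List.pyRange_one_eq_nil (by omega)]
    funext x y z
    simp only [List.foldl_nil, pvTab]
    split_ifs <;> first | rfl | omega

theorem pvOuter_aux (room : List (List Int)) (N : Int) (k : Nat) (hk : 1 + (k:Int) ≤ N) :
    (PySem.List.pyRange 1 (1 + (k:Int)) 1).foldl (pvOuter room N) (pvTab room N 1 2)
      = pvTab room N (1 + (k:Int)) 2 := by
  induction k with
  | zero =>
    rw [show ((1:Int) + ((0:Nat):Int)) = 1 by norm_num, PySem.List.pyRange_one_eq_nil le_rfl]
    rfl
  | succ k ih =>
    have h1 : (1:Int) + ((k+1:Nat):Int) = (1 + (k:Int)) + 1 := by push_cast; ring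
    rw [h1, PySem.List.pyRange_one_succ_right (by omega), List.foldl_append,
      ih (by omega)]
    simp only [List.foldl_cons, List.foldl_nil]
    exact pvOuter_step room N (1 + (k:Int)) (by omega) (by omega)

theorem pvRow0_eq_tab (room : List (List Int)) (N : Int) :
    pvRow0 room N = pvTab room N 1 2 := by
  funext x y z
  simp only [pvRow0, pvTab]
  split_ifs <;> first | rfl | omega

theorem pvA_eq_g (N : Int) (room : List (List Int)) :
    solution N room =
      pvG room (N-1) (N-1) 0 + pvG room (N-1) (N-1) 1 + pvG room (N-1) (N-1) 2 := by
  by_cases hN2 : 2 ≤ N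
  · have hdp2 : (PySem.List.pyRange 2 N 1).foldl (pvBody1 room) (pvUpd (fun _ _ _ => 0) 0 1 0 1)
        = pvRow0 room N := by
      have h := pvStage1_aux room (N-2).toNat
      rw [show ((2:Int) + ((N-2).toNat:Int)) = N by omega] at h
      exact h
    have hdp3 : (PySem.List.pyRange 1 N 1).foldl (pvOuter room N) (pvRow0 room N)
        = pvTab room N N 2 := by
      rw [pvRow0_eq_tab]
      have h := pvOuter_aux room N (N-1).toNat (by omega)
      rw [show ((1:Int) + ((N-1).toNat:Int)) = N by omega] at h
      exact h
    have hw : pvWrap (N-1) = N-1 := by simp only [pvWrap]; rw [if_neg (by omega)]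
    have hcell : ∀ c : Int, (c = 0 ∨ c = 1 ∨ c = 2) →
        pvTab room N N 2 (N-1) (N-1) c = pvG room (N-1) (N-1) c := by
      intro c hc
      by_cases hN3 : 3 ≤ N
      · exact pvTab_read room N N 2 (N-1) (N-1) c (by omega) hc
          (Or.inl ⟨by omega, by omega, by omega, by omega⟩)
      · have hN : N = 2 := by omega
        subst hN
        norm_num
        simp only [pvTab]
        rw [if_neg (by omega), if_neg (by omega), if_neg (by omega),
          pvG_j01 room 1 1 c (by omega) (by omega) (by omega)]
    simp only [solution, hdp2, hdp3, hw]
    rw [hcell 0 (by omega), hcell 1 (by omega), hcell 2 (by omega)]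
  · have e2 : PySem.List.pyRange 2 N 1 = [] := PySem.List.pyRange_one_eq_nil (by omega)
    have e1 : PySem.List.pyRange 1 N 1 = [] := PySem.List.pyRange_one_eq_nil (by omega)
    simp only [solution, e1, e2, List.foldl_nil]
    by_cases hN1 : N = 1
    · subst hN1
      norm_num
      simp only [pvWrap, pvUpd]
      norm_num
      rw [pvG_000 room 0, pvG_row0_d room 0 1 (by omega) (by omega),
        pvG_row0_d room 0 2 (by omega) (by omega)]
      norm_num
    · have hN0 : N ≤ 0 := by omega
      rw [pvG_neg room _ _ 0 (by omega), pvG_neg room _ _ 1 (by omega),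
        pvG_neg room _ _ 2 (by omega)]
      simp only [pvWrap, pvUpd]
      split_ifs <;> omega

theorem solution_spec : Claim_equal_solution := by
  intro N room _ _
  unfold Spec_solution
  rw [pvA_eq_g, pvAlt_eq_g]
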